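-- pv_equiv track=rewrite | github.com/Alva-Theaters/Sorcerer | harmonizer_two.py | highest_takes_precedence
-- ===== SOURCE A (Python) =====
-- def highest_takes_precedence(no_duplicates):
--     '''Standard HTP protocol mode'''
--     request_dict = {}
--
--     for c, p, v, i, a in no_duplicates:
--         key = (c, p)  # Key based on channel and parameter only
--         if key in request_dict:
--             if v > request_dict[key][2]:  # Compare the value
--                 request_dict[key] = (c, p, v, i, a)
--         else:
--             request_dict[key] = (c, p, v, i, a)
--
--     no_conflicts = list(request_dict.values())
--
--     return no_conflicts
-- ===== SOURCE B (Python) =====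
-- def highest_takes_precedence(no_duplicates):
--     '''Standard HTP protocol mode'''
--     groups = {}
--
--     for t in no_duplicates:
--         groups.setdefault((t[0], t[1]), []).append(t)
--
--     return [max(group, key=lambda t: t[2]) for group in groups.values()]
-- ===== Notes on version B (the rewrite author's own statement) =====
-- stated objective: alternative
-- what changed: Instead of maintaining a running best per key inside the loop, B first groups all tuples per (channel,parameter) key into lists, then reduces each group with max(key=t[2]) in a separate pass; first-appearance key order and earliest-wins tie-breaking coincide with A's.
import Mathlib
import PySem

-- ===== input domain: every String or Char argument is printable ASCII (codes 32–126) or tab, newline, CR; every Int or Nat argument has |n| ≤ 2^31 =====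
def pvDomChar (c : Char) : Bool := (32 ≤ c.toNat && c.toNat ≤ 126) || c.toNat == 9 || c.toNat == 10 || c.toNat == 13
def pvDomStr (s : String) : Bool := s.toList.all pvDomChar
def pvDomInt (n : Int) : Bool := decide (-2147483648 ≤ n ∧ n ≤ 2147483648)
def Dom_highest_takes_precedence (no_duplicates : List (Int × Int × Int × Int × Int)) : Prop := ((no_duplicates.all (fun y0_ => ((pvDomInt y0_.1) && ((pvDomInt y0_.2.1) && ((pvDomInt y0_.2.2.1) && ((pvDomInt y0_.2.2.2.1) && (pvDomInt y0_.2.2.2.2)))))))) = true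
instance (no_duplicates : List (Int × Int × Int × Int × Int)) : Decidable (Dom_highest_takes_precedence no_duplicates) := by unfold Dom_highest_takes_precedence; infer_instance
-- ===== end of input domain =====

-- B groups tuples per (channel,parameter) key first, then takes the per-group max in a second pass (same cost, different decomposition).


-- ===== PORT A =====
-- literal port: one loop keeping a running best tuple per (c, p) key in an insertion-ordered dict
def highest_takes_precedence (no_duplicates : List (Int × Int × Int × Int × Int)) : List (Int × Int × Int × Int × Int) :=
  let request_dict :=
    no_duplicates.foldl
      (fun request_dict t =>
        let key := (t.1, t.2.1)
        if request_dict.contains key then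
          -- request_dict[key][2]: the key is present here, so getD's default is never used
          if t.2.2.1 > (request_dict.getD key t).2.2.1 then request_dict.insert key t
          else request_dict
        else request_dict.insert key t)
      (PySem.Dict.empty : PySem.Dict (Int × Int) (Int × Int × Int × Int × Int))
  request_dict.values

-- ===== PORT B =====
-- max(group, key=lambda t: t[2]); groups are never empty, the none branch is unreachable
def pvBest (g : List (Int × Int × Int × Int × Int)) : Int × Int × Int × Int × Int :=
  match PySem.List.max? g (fun t => t.2.2.1) with
  | some m => m
  | none => (0, 0, 0, 0, 0)

def highest_takes_precedence_alt (no_duplicates : List (Int × Int × Int × Int × Int)) : List (Int × Int × Int × Int × Int) :=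
  let groups :=
    no_duplicates.foldl
      (fun groups t => groups.modify (t.1, t.2.1) [] (fun g => g ++ [t]))
      (PySem.Dict.empty : PySem.Dict (Int × Int) (List (Int × Int × Int × Int × Int)))
  groups.values.map pvBest

-- ===== PRECONDITION & SPEC =====
def Spec_highest_takes_precedence (no_duplicates : List (Int × Int × Int × Int × Int)) (out : List (Int × Int × Int × Int × Int)) : Prop := out = highest_takes_precedence_alt no_duplicates
instance (no_duplicates : List (Int × Int × Int × Int × Int)) (out : List (Int × Int × Int × Int × Int)) : Decidable (Spec_highest_takes_precedence no_duplicates out) := by unfold Spec_highest_takes_precedence; infer_instance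

-- ===== CLAIM (what is proved, stated in full; the proofs are below) =====
def Claim_equal_highest_takes_precedence : Prop := ∀ (no_duplicates : List (Int × Int × Int × Int × Int)), Dom_highest_takes_precedence no_duplicates → Spec_highest_takes_precedence no_duplicates (highest_takes_precedence no_duplicates)

-- ===== LEMMAS AND PROOFS =====

-- invariant linking A's running-best dict to B's dict of groups
def pvInv (dA : PySem.Dict (Int × Int) (Int × Int × Int × Int × Int))
    (dB : PySem.Dict (Int × Int) (List (Int × Int × Int × Int × Int))) : Prop :=
  dB.keys.Nodup ∧
  dA.items = dB.items.map (fun p => (p.1, pvBest p.2)) ∧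
  ∀ p ∈ dB.items, p.2 ≠ []

lemma pvBest_append (g : List (Int × Int × Int × Int × Int)) (hg : g ≠ [])
    (t : Int × Int × Int × Int × Int) :
    pvBest (g ++ [t]) = if (pvBest g).2.2.1 < t.2.2.1 then t else pvBest g := by
  obtain ⟨m, hm⟩ : ∃ m, PySem.List.max? g (fun t => t.2.2.1) = some m := by
    cases h : PySem.List.max? g (fun t => t.2.2.1) with
    | none => exact absurd ((PySem.List.max?_eq_none_iff g _).mp h) hg
    | some m => exact ⟨m, rfl⟩
  have happ : PySem.List.max? (g ++ [t]) (fun t => t.2.2.1)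
      = if m.2.2.1 < t.2.2.1 then some t else some m := by
    simp only [PySem.List.max?, List.foldl_append] at hm ⊢
    rw [hm]
    rfl
  by_cases hcmp : m.2.2.1 < t.2.2.1
  · simp only [pvBest, happ, hm, if_pos hcmp]
  · simp only [pvBest, happ, hm, if_neg hcmp]

lemma pvContains_rel (dA : PySem.Dict (Int × Int) (Int × Int × Int × Int × Int))
    (dB : PySem.Dict (Int × Int) (List (Int × Int × Int × Int × Int)))
    (hrel : dA.items = dB.items.map (fun p => (p.1, pvBest p.2))) (k : Int × Int) :
    dA.contains k = dB.contains k := by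
  simp only [PySem.Dict.contains, hrel, List.any_map]
  rfl

lemma pvGet?_rel (dA : PySem.Dict (Int × Int) (Int × Int × Int × Int × Int))
    (dB : PySem.Dict (Int × Int) (List (Int × Int × Int × Int × Int)))
    (hrel : dA.items = dB.items.map (fun p => (p.1, pvBest p.2))) (k : Int × Int) :
    dA.get? k = (dB.get? k).map pvBest := by
  simp only [PySem.Dict.get?, hrel, List.find?_map]
  rw [show ((fun (p : (Int × Int) × (Int × Int × Int × Int × Int)) => p.1 == k) ∘
      (fun (p : (Int × Int) × List (Int × Int × Int × Int × Int)) => (p.1, pvBest p.2)))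
      = (fun p => p.1 == k) from rfl]
  cases hf : List.find? (fun p => p.1 == k) dB.items <;> rfl

lemma pvStep (dA : PySem.Dict (Int × Int) (Int × Int × Int × Int × Int))
    (dB : PySem.Dict (Int × Int) (List (Int × Int × Int × Int × Int)))
    (h : pvInv dA dB) (t : Int × Int × Int × Int × Int) :
    pvInv
      (if dA.contains (t.1, t.2.1) then
        (if t.2.2.1 > (dA.getD (t.1, t.2.1) t).2.2.1 then dA.insert (t.1, t.2.1) t else dA)
       else dA.insert (t.1, t.2.1) t)
      (dB.modify (t.1, t.2.1) [] (fun g => g ++ [t])) := by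
  obtain ⟨hnd, hrel, hne⟩ := h
  set k : Int × Int := (t.1, t.2.1) with hk
  have hc := pvContains_rel dA dB hrel k
  by_cases hcb : dB.contains k = true
  · -- key already present: B appends t to the group g0, A keeps the larger of best and t
    obtain ⟨g0, hg0⟩ : ∃ g0, dB.get? k = some g0 := by
      rw [PySem.Dict.contains_eq_isSome_get?] at hcb
      exact Option.isSome_iff_exists.mp hcb
    have hg0ne : g0 ≠ [] := hne _ (PySem.Dict.mem_items_of_get?_eq_some dB hg0)
    have hgetA : dA.getD k t = pvBest g0 := by
      simp [PySem.Dict.getD, pvGet?_rel dA dB hrel k, hg0]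
    have hgetB : dB.getD k [] = g0 := by simp [PySem.Dict.getD, hg0]
    have hmod : dB.modify k [] (fun g => g ++ [t]) = dB.insert k (g0 ++ [t]) := by
      simp [PySem.Dict.modify, hgetB]
    have hndB' : (dB.insert k (g0 ++ [t])).keys.Nodup := PySem.Dict.nodup_keys_insert dB k _ hnd
    have hitemsB : (dB.insert k (g0 ++ [t])).items
        = dB.items.map (fun p => if (p.1 == k) = true then (k, g0 ++ [t]) else p) :=
      PySem.Dict.items_insert_of_contains dB _ hcb
    have hneB' : ∀ p ∈ dB.insert k (g0 ++ [t]) |>.items, p.2 ≠ [] := by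
      intro p hp
      rw [hitemsB] at hp
      obtain ⟨q, hq, hqe⟩ := List.mem_map.mp hp
      by_cases hq1 : (q.1 == k) = true
      · simp [hq1] at hqe; subst hqe; simp
      · simp [hq1] at hqe; subst hqe; exact hne _ hq
    have hbestapp := pvBest_append g0 hg0ne t
    rw [hmod]
    by_cases hcmp : (pvBest g0).2.2.1 < t.2.2.1
    · -- A replaces its entry with t; pvBest (g0 ++ [t]) = t
      have hbt : pvBest (g0 ++ [t]) = t := by rw [hbestapp, if_pos hcmp]
      refine ⟨hndB', ?_, hneB'⟩
      rw [if_pos (by rw [hc]; exact hcb), if_pos (by rw [hgetA]; exact hcmp)]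
      rw [PySem.Dict.items_insert_of_contains dA t (by rw [hc]; exact hcb), hrel, hitemsB,
        List.map_map, List.map_map]
      refine List.map_congr_left (fun p _ => ?_)
      by_cases hp1 : (p.1 == k) = true <;> simp [Function.comp, hp1, hbt]
    · -- A keeps its entry; pvBest (g0 ++ [t]) = pvBest g0
      have hbt : pvBest (g0 ++ [t]) = pvBest g0 := by rw [hbestapp, if_neg hcmp]
      refine ⟨hndB', ?_, hneB'⟩
      rw [if_pos (by rw [hc]; exact hcb), if_neg (by rw [hgetA]; exact hcmp)]
      rw [hrel, hitemsB, List.map_map]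
      refine List.map_congr_left (fun p hp => ?_)
      by_cases hp1 : (p.1 == k) = true
      · have hp1' : p.1 = k := by exact eq_of_beq hp1
        -- nodup keys: the entry found by get? is the entry p itself
        have hpg : dB.get? k = some p.2 := by
          have : (k, p.2) ∈ dB.items := by rw [← hp1']; exact hp
          exact PySem.Dict.get?_of_mem_items dB this hnd
        have hpg0 : p.2 = g0 := by rw [hpg] at hg0; exact Option.some.inj hg0
        simp [Function.comp, hp1', hpg0, hbt]
      · simp [Function.comp, hp1]
  · -- new key: both dicts append a fresh entry
    have hcb' : dB.contains k = false := by simp only [Bool.not_eq_true] at hcb; exact hcb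
    refine ⟨?_, ?_, ?_⟩
    · rw [PySem.Dict.modify]; exact PySem.Dict.nodup_keys_insert dB k _ hnd
    · rw [if_neg (by rw [hc, hcb']; simp)]
      rw [PySem.Dict.modify, PySem.Dict.getD_of_not_contains dB [] hcb',
        PySem.Dict.items_insert_of_not_contains dB _ hcb',
        PySem.Dict.items_insert_of_not_contains dA t (by rw [hc]; exact hcb'),
        hrel, List.map_append]
      rfl
    · intro p hp
      rw [PySem.Dict.modify, PySem.Dict.getD_of_not_contains dB [] hcb',
        PySem.Dict.items_insert_of_not_contains dB _ hcb'] at hp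
      rcases List.mem_append.mp hp with hp' | hp'
      · exact hne _ hp'
      · simp at hp'; subst hp'; simp

lemma pvLoop (xs : List (Int × Int × Int × Int × Int))
    (dA : PySem.Dict (Int × Int) (Int × Int × Int × Int × Int))
    (dB : PySem.Dict (Int × Int) (List (Int × Int × Int × Int × Int)))
    (h : pvInv dA dB) :
    pvInv
      (xs.foldl (fun request_dict t =>
        let key := (t.1, t.2.1)
        if request_dict.contains key then
          if t.2.2.1 > (request_dict.getD key t).2.2.1 then request_dict.insert key t
          else request_dict
        else request_dict.insert key t) dA)
      (xs.foldl (fun groups t => groups.modify (t.1, t.2.1) [] (fun g => g ++ [t])) dB) := by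
  induction xs generalizing dA dB with
  | nil => exact h
  | cons t xs ih => exact ih _ _ (pvStep dA dB h t)

-- ===== VERDICT (by name: the statement is the Claim_ definition above) =====
theorem highest_takes_precedence_spec : Claim_equal_highest_takes_precedence := by
  intro no_duplicates _
  unfold Spec_highest_takes_precedence highest_takes_precedence highest_takes_precedence_alt
  have h := pvLoop no_duplicates PySem.Dict.empty PySem.Dict.empty
    ⟨by simp [PySem.Dict.keys, PySem.Dict.empty], by simp [PySem.Dict.empty], by simp [PySem.Dict.empty]⟩
  obtain ⟨_, hrel, _⟩ := h
  simp only [PySem.Dict.values, hrel, List.map_map]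
  rfl
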